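-- pv_equiv track=rewrite | github.com/Nyha15/ShiftLeft | mvp_0.5/sensitivity_analyzer.py | _infer_parameter_type
-- ===== SOURCE A (Python) =====
-- def _infer_parameter_type(param_name: str) -> str:
--     """Infer parameter type from name"""
--     name_lower = param_name.lower()
--
--     if any(word in name_lower for word in ['mass', 'inertia']):
--         return 'physical'
--     elif any(word in name_lower for word in ['friction', 'damping']):
--         return 'contact'
--     elif any(word in name_lower for word in ['gain', 'stiffness', 'pid']):
--         return 'control'
--     elif any(word in name_lower for word in ['noise', 'threshold']):
--         return 'sensor'
--     elif any(word in name_lower for word in ['limit', 'velocity', 'acceleration']):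
--         return 'constraint'
--     else:
--         return 'general'
-- ===== SOURCE B (Python) =====
-- # Sliding-window dictionary lookup: instead of searching the name for each keyword,
-- # scan each position of the name once and look up the candidate substrings (one per
-- # distinct keyword length) in a hash map keyword -> (priority, category); keep the
-- # best (lowest-priority) hit, which reproduces A's first-branch-wins order.
--
-- _KEYWORDS = {
--     'mass': (0, 'physical'), 'inertia': (0, 'physical'),
--     'friction': (1, 'contact'), 'damping': (1, 'contact'),
--     'gain': (2, 'control'), 'stiffness': (2, 'control'), 'pid': (2, 'control'),
--     'noise': (3, 'sensor'), 'threshold': (3, 'sensor'),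
--     'limit': (4, 'constraint'), 'velocity': (4, 'constraint'),
--     'acceleration': (4, 'constraint'),
-- }
-- _LENGTHS = sorted({len(k) for k in _KEYWORDS})
--
--
-- def _infer_parameter_type(param_name: str) -> str:
--     """Infer parameter type from name"""
--     s = param_name.lower()
--     best_p, best_cat = 5, 'general'
--     for i in range(len(s)):
--         for L in _LENGTHS:
--             hit = _KEYWORDS.get(s[i:i + L])
--             if hit is not None and hit[0] < best_p:
--                 best_p, best_cat = hit
--     return best_cat
-- ===== Notes on version B (the rewrite author's own statement) =====
-- stated objective: alternative
-- what changed: Replaces per-keyword substring searches (A scans the name once for each of the 12 keywords, branch by branch) with a single sliding-window pass over the name that looks each candidate substring (one per distinct keyword length) up in a keyword->(priority,category) hash map, keeping the lowest-priority hit; the priority order reproduces A's first-branch-wins semantics.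
import Mathlib
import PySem

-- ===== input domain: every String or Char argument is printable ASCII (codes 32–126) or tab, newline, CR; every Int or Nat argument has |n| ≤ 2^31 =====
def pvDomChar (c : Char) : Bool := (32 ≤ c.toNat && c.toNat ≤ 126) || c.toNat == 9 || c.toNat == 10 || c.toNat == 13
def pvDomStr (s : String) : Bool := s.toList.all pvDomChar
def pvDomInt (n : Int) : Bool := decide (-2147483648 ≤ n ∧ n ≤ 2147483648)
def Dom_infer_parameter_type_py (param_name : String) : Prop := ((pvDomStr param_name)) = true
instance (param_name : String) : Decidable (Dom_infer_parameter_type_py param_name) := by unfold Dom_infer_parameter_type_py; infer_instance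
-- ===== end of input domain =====

-- B replaces per-keyword substring searches with a single sliding-window pass hashing candidate
-- substrings into a keyword -> (priority, category) map, keeping the lowest-priority hit.


-- ===== PORT A =====
def infer_parameter_type_py (param_name : String) : String :=
  let name_lower := PySem.Str.lower param_name
  if ["mass", "inertia"].any (fun w => PySem.Str.isIn w name_lower) then "physical"
  else if ["friction", "damping"].any (fun w => PySem.Str.isIn w name_lower) then "contact"
  else if ["gain", "stiffness", "pid"].any (fun w => PySem.Str.isIn w name_lower) then "control"
  else if ["noise", "threshold"].any (fun w => PySem.Str.isIn w name_lower) then "sensor"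
  else if ["limit", "velocity", "acceleration"].any (fun w => PySem.Str.isIn w name_lower) then "constraint"
  else "general"

-- ===== PORT B =====
-- the literal pairs of Source B's _KEYWORDS dict
def pvPairs : List (String × (Int × String)) :=
  [("mass", (0, "physical")), ("inertia", (0, "physical")),
   ("friction", (1, "contact")), ("damping", (1, "contact")),
   ("gain", (2, "control")), ("stiffness", (2, "control")), ("pid", (2, "control")),
   ("noise", (3, "sensor")), ("threshold", (3, "sensor")),
   ("limit", (4, "constraint")), ("velocity", (4, "constraint")),
   ("acceleration", (4, "constraint"))]

def pvKw : PySem.Dict String (Int × String) := PySem.Dict.ofList pvPairs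

-- _LENGTHS = sorted({len(k) for k in _KEYWORDS}) evaluates to this literal
def pvLens : List Int := [3, 4, 5, 7, 8, 9, 12]

def infer_parameter_type_py_alt (param_name : String) : String :=
  let s := PySem.Str.lower param_name
  let r := (PySem.List.pyRange 0 (PySem.Str.len s) 1).foldl
    (fun b i => pvLens.foldl
      (fun b L =>
        match PySem.Dict.get? pvKw (PySem.Str.slice s (some i) (some (i + L))) with
        | some hit => if hit.1 < b.1 then hit else b
        | none => b) b) (5, "general")
  r.2

-- ===== PRECONDITION & SPEC =====
def Spec_infer_parameter_type_py (param_name : String) (out : String) : Prop := out = infer_parameter_type_py_alt param_name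
instance (param_name : String) (out : String) : Decidable (Spec_infer_parameter_type_py param_name out) := by unfold Spec_infer_parameter_type_py; infer_instance

-- ===== CLAIM (what is proved, stated in full; the proofs are below) =====
def Claim_equal_infer_parameter_type_py : Prop := ∀ (param_name : String), Dom_infer_parameter_type_py param_name → Spec_infer_parameter_type_py param_name (infer_parameter_type_py param_name)

-- ===== LEMMAS AND PROOFS =====

-- the min-update step of B's scan, over an abstract lookup h
def pvStep {α : Type} (h : α → Option (Int × String)) (b : Int × String) (x : α) : Int × String :=
  match h x with
  | some hit => if hit.1 < b.1 then hit else b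
  | none => b

-- the nested loop is the same min-fold over the flattened (i, L) pair list
lemma pvFold_flatten {α γ : Type} (h2 : α → γ → Option (Int × String))
    (l1 : List α) (l2 : List γ) (b : Int × String) :
    l1.foldl (fun b i => l2.foldl (fun b L => pvStep (fun L => h2 i L) b L) b) b
      = (l1.flatMap (fun i => l2.map (fun L => (i, L)))).foldl
          (pvStep (fun x => h2 x.1 x.2)) b := by
  induction l1 generalizing b with
  | nil => rfl
  | cons a l ih =>
    simp only [List.foldl_cons, List.flatMap_cons, List.foldl_append, List.foldl_map, ih]
    rfl

-- characterisation of the min-fold: the result is the initial value or a looked-up hit,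
-- its priority never exceeds the initial one nor any hit's priority
lemma pvFold_spec {α : Type} (h : α → Option (Int × String)) :
    ∀ (l : List α) (b : Int × String),
      (l.foldl (pvStep h) b = b ∨ ∃ x ∈ l, h x = some (l.foldl (pvStep h) b)) ∧
      (l.foldl (pvStep h) b).1 ≤ b.1 ∧
      (∀ x ∈ l, ∀ hit, h x = some hit → (l.foldl (pvStep h) b).1 ≤ hit.1) := by
  intro l
  induction l with
  | nil => simp
  | cons a l ih =>
    intro b
    obtain ⟨ih1, ih2, ih3⟩ := ih (pvStep h b a)
    have hs1 : (pvStep h b a).1 ≤ b.1 := by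
      unfold pvStep
      cases hha : h a with
      | none => simp
      | some hit => simp only; split <;> omega
    have hs2 : pvStep h b a = b ∨ h a = some (pvStep h b a) := by
      unfold pvStep
      cases hha : h a with
      | none => exact Or.inl rfl
      | some hit => simp only; split; exacts [Or.inr rfl, Or.inl rfl]
    have hs3 : ∀ hit, h a = some hit → (pvStep h b a).1 ≤ hit.1 := by
      intro hit hhit
      unfold pvStep
      rw [hhit]
      simp only
      split <;> omega
    refine ⟨?_, ?_, ?_⟩
    · simp only [List.foldl_cons]
      rcases ih1 with h1 | ⟨x, hx, hhx⟩
      · rcases hs2 with hb | hha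
        · exact Or.inl (h1.trans hb)
        · exact Or.inr ⟨a, List.mem_cons_self, by rw [h1]; exact hha⟩
      · exact Or.inr ⟨x, List.mem_cons_of_mem _ hx, hhx⟩
    · simp only [List.foldl_cons]
      omega
    · intro x hx hit hhit
      simp only [List.foldl_cons]
      rcases List.mem_cons.mp hx with rfl | hx'
      · exact le_trans ih2 (hs3 hit hhit)
      · exact ih3 x hx' hit hhit

lemma pvKw_items : pvKw.items = pvPairs := by rfl

lemma pvKw_nodup : pvKw.keys.Nodup := by decide

-- a dict hit is one of the literal pairs
lemma pvKw_sound (sub : String) (hit : Int × String)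
    (h : PySem.Dict.get? pvKw sub = some hit) : (sub, hit) ∈ pvPairs := by
  have hm := PySem.Dict.mem_items_of_get?_eq_some pvKw h
  rwa [pvKw_items] at hm

-- every literal pair is found by the dict
lemma pvKw_complete (p : String × (Int × String)) (hp : p ∈ pvPairs) :
    PySem.Dict.get? pvKw p.1 = some p.2 := by
  refine PySem.Dict.get?_of_mem_items pvKw ?_ pvKw_nodup
  rw [pvKw_items]
  simpa using hp

-- a slice of s that equals w makes w a substring of s
lemma pvSlice_isIn (s w : String) (i L : Int) (hi : 0 ≤ i) (hL : 0 ≤ L)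
    (h : PySem.Str.slice s (some i) (some (i + L)) = w) : PySem.Str.isIn w s = true := by
  have hlist : w.toList = (s.toList.drop i.toNat).take ((i + L).toNat - i.toNat) := by
    rw [← h]
    simp only [PySem.Str.toList_slice, PySem.Chars.slice_eq_listSlice]
    rw [PySem.List.slice_toNat _ hi (by omega)]
  rw [PySem.Str.isIn_eq, PySem.Chars.isIn_iff_infix, hlist]
  exact ((List.take_prefix _ _).isInfix).trans (List.drop_suffix _ _).isInfix

-- if a keyword occurs in s, some window of B's scan hits it
lemma pvKw_hit (s : String) (w : String) (v : Int × String)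
    (hp : (w, v) ∈ pvPairs) (hin : PySem.Str.isIn w s = true) :
    ∃ i ∈ PySem.List.pyRange 0 (PySem.Str.len s) 1, ∃ L ∈ pvLens,
      PySem.Dict.get? pvKw (PySem.Str.slice s (some i) (some (i + L))) = some v := by
  rw [PySem.Str.isIn_eq, PySem.Chars.isIn_iff_infix] at hin
  obtain ⟨u, t, hut⟩ := hin
  have hfacts : ((w.toList.length : Int) ∈ pvLens ∧ w.toList ≠ []) := by
    have hall : ∀ p ∈ pvPairs, ((p.1.toList.length : Int) ∈ pvLens ∧ p.1.toList ≠ []) := by decide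
    exact hall (w, v) hp
  refine ⟨(u.length : Int), ?_, (w.toList.length : Int), hfacts.1, ?_⟩
  · rw [PySem.List.mem_pyRange_one]
    have hlen : s.toList.length = u.length + w.toList.length + t.length := by
      rw [← hut]; simp only [List.length_append]
    have hw : w.toList.length ≠ 0 := fun h0 => hfacts.2 (List.eq_nil_of_length_eq_zero h0)
    have hsl : PySem.Str.len s = (s.toList.length : Int) := by
      rw [PySem.Str.len_eq, String.length_toList]
    rw [hsl]
    omega
  · have hslice : PySem.Str.slice s (some (u.length : Int))
        (some ((u.length : Int) + (w.toList.length : Int))) = w := by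
      rw [← String.toList_inj]
      simp only [PySem.Str.toList_slice, PySem.Chars.slice_eq_listSlice,
        PySem.List.slice_natCast_add]
      rw [← hut, List.append_assoc, List.drop_left, List.take_left]
    rw [hslice]
    exact pvKw_complete (w, v) hp

-- ===== VERDICT (by name: the statement is the Claim_ definition above) =====
theorem infer_parameter_type_py_spec : Claim_equal_infer_parameter_type_py := by
  intro param_name _
  unfold Spec_infer_parameter_type_py infer_parameter_type_py infer_parameter_type_py_alt
  set s := PySem.Str.lower param_name with hs
  have hB : (PySem.List.pyRange 0 (PySem.Str.len s) 1).foldl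
      (fun b i => pvLens.foldl
        (fun b L =>
          match PySem.Dict.get? pvKw (PySem.Str.slice s (some i) (some (i + L))) with
          | some hit => if hit.1 < b.1 then hit else b
          | none => b) b) ((5 : Int), "general")
      = ((PySem.List.pyRange 0 (PySem.Str.len s) 1).flatMap
          (fun i => pvLens.map (fun L => (i, L)))).foldl
          (pvStep (fun x => PySem.Dict.get? pvKw (PySem.Str.slice s (some x.1) (some (x.1 + x.2))))) ((5 : Int), "general") :=
    pvFold_flatten (fun i L => PySem.Dict.get? pvKw (PySem.Str.slice s (some i) (some (i + L)))) _ _ _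
  simp only [hB]
  set P := (PySem.List.pyRange 0 (PySem.Str.len s) 1).flatMap
      (fun i => pvLens.map (fun L => (i, L))) with hP
  set h := fun x : Int × Int => PySem.Dict.get? pvKw (PySem.Str.slice s (some x.1) (some (x.1 + x.2))) with hh
  set r := P.foldl (pvStep h) ((5 : Int), "general") with hr
  obtain ⟨hr1, hr2, hr3⟩ := pvFold_spec h P ((5 : Int), "general")
  rw [← hr] at hr1 hr2 hr3
  -- sound: any hit of the scan is a keyword occurring in s
  have hsound : ∀ x ∈ P, ∀ hit, h x = some hit →
      ∃ w, (w, hit) ∈ pvPairs ∧ PySem.Str.isIn w s = true := by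
    intro x hx hit hhit
    have hx' : x.1 ∈ PySem.List.pyRange 0 (PySem.Str.len s) 1 ∧ x.2 ∈ pvLens := by
      rw [hP] at hx
      simp only [List.mem_flatMap, List.mem_map] at hx
      obtain ⟨i, hi, L, hL, rfl⟩ := hx
      exact ⟨hi, hL⟩
    have hi0 : 0 ≤ x.1 := (PySem.List.mem_pyRange_one.mp hx'.1).1
    have hL0 : 0 ≤ x.2 := by
      have hall : ∀ L ∈ pvLens, (0 : Int) ≤ L := by decide
      exact hall x.2 hx'.2
    exact ⟨_, pvKw_sound _ _ hhit, pvSlice_isIn s _ x.1 x.2 hi0 hL0 rfl⟩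
  -- complete: a keyword occurring in s bounds the scan's result priority
  have hcomp : ∀ w v, (w, v) ∈ pvPairs → PySem.Str.isIn w s = true → r.1 ≤ v.1 := by
    intro w v hp hin
    obtain ⟨i, hi, L, hL, hget⟩ := pvKw_hit s w v hp hin
    have hmem : (i, L) ∈ P := by
      rw [hP]
      simp only [List.mem_flatMap, List.mem_map]
      exact ⟨i, hi, L, hL, rfl⟩
    exact hr3 (i, L) hmem v hget
  simp only [List.any_cons, List.any_nil, Bool.or_false, Bool.or_eq_true]
  split_ifs with h0 h1 h2 h3 h4
  · have hle : r.1 ≤ 0 := by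
      rcases h0 with h | h
      · exact hcomp "mass" (0, "physical") (by simp [pvPairs]) h
      · exact hcomp "inertia" (0, "physical") (by simp [pvPairs]) h
    rcases hr1 with hv | ⟨x, hx, hhx⟩
    · rw [hv] at hle; exact absurd hle (by decide)
    · obtain ⟨w, hwp, hwin⟩ := hsound x hx r hhx
      simp only [pvPairs, List.mem_cons, List.not_mem_nil, or_false, Prod.mk.injEq] at hwp
      rcases hwp with ⟨hw, hv⟩ | ⟨hw, hv⟩ | ⟨hw, hv⟩ | ⟨hw, hv⟩ | ⟨hw, hv⟩ | ⟨hw, hv⟩ | ⟨hw, hv⟩ | ⟨hw, hv⟩ | ⟨hw, hv⟩ | ⟨hw, hv⟩ | ⟨hw, hv⟩ | ⟨hw, hv⟩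
      · simp [hv]
      · simp [hv]
      · rw [hv] at hle; exact absurd hle (by decide)
      · rw [hv] at hle; exact absurd hle (by decide)
      · rw [hv] at hle; exact absurd hle (by decide)
      · rw [hv] at hle; exact absurd hle (by decide)
      · rw [hv] at hle; exact absurd hle (by decide)
      · rw [hv] at hle; exact absurd hle (by decide)
      · rw [hv] at hle; exact absurd hle (by decide)
      · rw [hv] at hle; exact absurd hle (by decide)
      · rw [hv] at hle; exact absurd hle (by decide)
      · rw [hv] at hle; exact absurd hle (by decide)
  ·
    push Not at h0
    have hle : r.1 ≤ 1 := by
      rcases h1 with h | h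
      · exact hcomp "friction" (1, "contact") (by simp [pvPairs]) h
      · exact hcomp "damping" (1, "contact") (by simp [pvPairs]) h
    rcases hr1 with hv | ⟨x, hx, hhx⟩
    · rw [hv] at hle; exact absurd hle (by decide)
    · obtain ⟨w, hwp, hwin⟩ := hsound x hx r hhx
      simp only [pvPairs, List.mem_cons, List.not_mem_nil, or_false, Prod.mk.injEq] at hwp
      rcases hwp with ⟨hw, hv⟩ | ⟨hw, hv⟩ | ⟨hw, hv⟩ | ⟨hw, hv⟩ | ⟨hw, hv⟩ | ⟨hw, hv⟩ | ⟨hw, hv⟩ | ⟨hw, hv⟩ | ⟨hw, hv⟩ | ⟨hw, hv⟩ | ⟨hw, hv⟩ | ⟨hw, hv⟩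
      · exact absurd (hw ▸ hwin) h0.1
      · exact absurd (hw ▸ hwin) h0.2
      · simp [hv]
      · simp [hv]
      · rw [hv] at hle; exact absurd hle (by decide)
      · rw [hv] at hle; exact absurd hle (by decide)
      · rw [hv] at hle; exact absurd hle (by decide)
      · rw [hv] at hle; exact absurd hle (by decide)
      · rw [hv] at hle; exact absurd hle (by decide)
      · rw [hv] at hle; exact absurd hle (by decide)
      · rw [hv] at hle; exact absurd hle (by decide)
      · rw [hv] at hle; exact absurd hle (by decide)
  ·
    push Not at h0 h1
    have hle : r.1 ≤ 2 := by
      rcases h2 with h | h | h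
      · exact hcomp "gain" (2, "control") (by simp [pvPairs]) h
      · exact hcomp "stiffness" (2, "control") (by simp [pvPairs]) h
      · exact hcomp "pid" (2, "control") (by simp [pvPairs]) h
    rcases hr1 with hv | ⟨x, hx, hhx⟩
    · rw [hv] at hle; exact absurd hle (by decide)
    · obtain ⟨w, hwp, hwin⟩ := hsound x hx r hhx
      simp only [pvPairs, List.mem_cons, List.not_mem_nil, or_false, Prod.mk.injEq] at hwp
      rcases hwp with ⟨hw, hv⟩ | ⟨hw, hv⟩ | ⟨hw, hv⟩ | ⟨hw, hv⟩ | ⟨hw, hv⟩ | ⟨hw, hv⟩ | ⟨hw, hv⟩ | ⟨hw, hv⟩ | ⟨hw, hv⟩ | ⟨hw, hv⟩ | ⟨hw, hv⟩ | ⟨hw, hv⟩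
      · exact absurd (hw ▸ hwin) h0.1
      · exact absurd (hw ▸ hwin) h0.2
      · exact absurd (hw ▸ hwin) h1.1
      · exact absurd (hw ▸ hwin) h1.2
      · simp [hv]
      · simp [hv]
      · simp [hv]
      · rw [hv] at hle; exact absurd hle (by decide)
      · rw [hv] at hle; exact absurd hle (by decide)
      · rw [hv] at hle; exact absurd hle (by decide)
      · rw [hv] at hle; exact absurd hle (by decide)
      · rw [hv] at hle; exact absurd hle (by decide)
  ·
    push Not at h0 h1 h2
    have hle : r.1 ≤ 3 := by
      rcases h3 with h | h
      · exact hcomp "noise" (3, "sensor") (by simp [pvPairs]) h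
      · exact hcomp "threshold" (3, "sensor") (by simp [pvPairs]) h
    rcases hr1 with hv | ⟨x, hx, hhx⟩
    · rw [hv] at hle; exact absurd hle (by decide)
    · obtain ⟨w, hwp, hwin⟩ := hsound x hx r hhx
      simp only [pvPairs, List.mem_cons, List.not_mem_nil, or_false, Prod.mk.injEq] at hwp
      rcases hwp with ⟨hw, hv⟩ | ⟨hw, hv⟩ | ⟨hw, hv⟩ | ⟨hw, hv⟩ | ⟨hw, hv⟩ | ⟨hw, hv⟩ | ⟨hw, hv⟩ | ⟨hw, hv⟩ | ⟨hw, hv⟩ | ⟨hw, hv⟩ | ⟨hw, hv⟩ | ⟨hw, hv⟩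
      · exact absurd (hw ▸ hwin) h0.1
      · exact absurd (hw ▸ hwin) h0.2
      · exact absurd (hw ▸ hwin) h1.1
      · exact absurd (hw ▸ hwin) h1.2
      · exact absurd (hw ▸ hwin) h2.1
      · exact absurd (hw ▸ hwin) h2.2.1
      · exact absurd (hw ▸ hwin) h2.2.2
      · simp [hv]
      · simp [hv]
      · rw [hv] at hle; exact absurd hle (by decide)
      · rw [hv] at hle; exact absurd hle (by decide)
      · rw [hv] at hle; exact absurd hle (by decide)
  ·
    push Not at h0 h1 h2 h3
    have hle : r.1 ≤ 4 := by
      rcases h4 with h | h | h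
      · exact hcomp "limit" (4, "constraint") (by simp [pvPairs]) h
      · exact hcomp "velocity" (4, "constraint") (by simp [pvPairs]) h
      · exact hcomp "acceleration" (4, "constraint") (by simp [pvPairs]) h
    rcases hr1 with hv | ⟨x, hx, hhx⟩
    · rw [hv] at hle; exact absurd hle (by decide)
    · obtain ⟨w, hwp, hwin⟩ := hsound x hx r hhx
      simp only [pvPairs, List.mem_cons, List.not_mem_nil, or_false, Prod.mk.injEq] at hwp
      rcases hwp with ⟨hw, hv⟩ | ⟨hw, hv⟩ | ⟨hw, hv⟩ | ⟨hw, hv⟩ | ⟨hw, hv⟩ | ⟨hw, hv⟩ | ⟨hw, hv⟩ | ⟨hw, hv⟩ | ⟨hw, hv⟩ | ⟨hw, hv⟩ | ⟨hw, hv⟩ | ⟨hw, hv⟩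
      · exact absurd (hw ▸ hwin) h0.1
      · exact absurd (hw ▸ hwin) h0.2
      · exact absurd (hw ▸ hwin) h1.1
      · exact absurd (hw ▸ hwin) h1.2
      · exact absurd (hw ▸ hwin) h2.1
      · exact absurd (hw ▸ hwin) h2.2.1
      · exact absurd (hw ▸ hwin) h2.2.2
      · exact absurd (hw ▸ hwin) h3.1
      · exact absurd (hw ▸ hwin) h3.2
      · simp [hv]
      · simp [hv]
      · simp [hv]
  · push Not at h0 h1 h2 h3 h4
    have hle : r.1 ≤ 5 := hr2
    rcases hr1 with hv | ⟨x, hx, hhx⟩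
    · simp [hv]
    · obtain ⟨w, hwp, hwin⟩ := hsound x hx r hhx
      simp only [pvPairs, List.mem_cons, List.not_mem_nil, or_false, Prod.mk.injEq] at hwp
      rcases hwp with ⟨hw, hv⟩ | ⟨hw, hv⟩ | ⟨hw, hv⟩ | ⟨hw, hv⟩ | ⟨hw, hv⟩ | ⟨hw, hv⟩ | ⟨hw, hv⟩ | ⟨hw, hv⟩ | ⟨hw, hv⟩ | ⟨hw, hv⟩ | ⟨hw, hv⟩ | ⟨hw, hv⟩
      · exact absurd (hw ▸ hwin) h0.1
      · exact absurd (hw ▸ hwin) h0.2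
      · exact absurd (hw ▸ hwin) h1.1
      · exact absurd (hw ▸ hwin) h1.2
      · exact absurd (hw ▸ hwin) h2.1
      · exact absurd (hw ▸ hwin) h2.2.1
      · exact absurd (hw ▸ hwin) h2.2.2
      · exact absurd (hw ▸ hwin) h3.1
      · exact absurd (hw ▸ hwin) h3.2
      · exact absurd (hw ▸ hwin) h4.1
      · exact absurd (hw ▸ hwin) h4.2.1
      · exact absurd (hw ▸ hwin) h4.2.2
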